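-- pv_equiv track=rewrite | github.com/hiwafeizi/half_stupid | rotterdam_minecraft/builder/core/extrusion.py | extrude_box
-- ===== SOURCE A (Python) =====
-- from typing import Set, Tuple, Callable, Optional
--
-- Coord3D = Tuple[int, int, int]
--
-- def extrude_box(
--     width: int,
--     height: int,
--     depth: int,
--     start_x: int = 0,
--     start_y: int = 0,
--     start_z: int = 0,
--     hollow: bool = False,
--     wall_thickness: int = 1,
-- ) -> Set[Coord3D]:
--     """Generate a rectangular box (filled or hollow shell).
--
--     Simpler than using extrude_constant for basic rectangular volumes.
--
--     Args:
--         width: Size along X.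
--         height: Size along Y.
--         depth: Size along Z.
--         start_x/y/z: Origin corner.
--         hollow: If True, only walls (no interior fill).
--         wall_thickness: Wall thickness when hollow.
--     """
--     points = set()
--     for x in range(start_x, start_x + width):
--         for y in range(start_y, start_y + height):
--             for z in range(start_z, start_z + depth):
--                 if hollow:
--                     # Check if on any wall face
--                     on_x_wall = x < start_x + wall_thickness or x >= start_x + width - wall_thickness
--                     on_y_wall = y < start_y + wall_thickness or y >= start_y + height - wall_thickness
--                     on_z_wall = z < start_z + wall_thickness or z >= start_z + depth - wall_thickness
--                     if on_x_wall or on_y_wall or on_z_wall: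
--                         points.add((x, y, z))
--                 else:
--                     points.add((x, y, z))
--     return points
-- ===== SOURCE B (Python) =====
-- def extrude_box(
--     width,
--     height,
--     depth,
--     start_x=0,
--     start_y=0,
--     start_z=0,
--     hollow=False,
--     wall_thickness=1,
-- ):
--     """Emit only shell rows directly (full slabs on wall layers, two short z-runs
--     inside), skipping the interior scan; a filled box is a shell of full thickness."""
--     t = wall_thickness if hollow else max(width, height, depth)
--     points = set()
--     for x in range(start_x, start_x + width):
--         if x < start_x + t or x >= start_x + width - t:
--             for y in range(start_y, start_y + height):
--                 for z in range(start_z, start_z + depth):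
--                     points.add((x, y, z))
--         else:
--             for y in range(start_y, start_y + height):
--                 if y < start_y + t or y >= start_y + height - t:
--                     for z in range(start_z, start_z + depth):
--                         points.add((x, y, z))
--                 else:
--                     for z in range(start_z, min(start_z + t, start_z + depth)):
--                         points.add((x, y, z))
--                     for z in range(max(start_z + depth - t, start_z + t), start_z + depth):
--                         points.add((x, y, z))
--     return points
-- ===== Notes on version B (the rewrite author's own statement) =====
-- stated objective: alternative
-- what changed: B never scans the interior and tests no per-cell wall condition: wall x-layers emit full y-z slabs and interior x-layers emit full rows on wall y-lines plus two short z-runs, with the filled case handled as a shell of full thickness; A triple-loops over the whole volume testing a wall condition per cell.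
import Mathlib
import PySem

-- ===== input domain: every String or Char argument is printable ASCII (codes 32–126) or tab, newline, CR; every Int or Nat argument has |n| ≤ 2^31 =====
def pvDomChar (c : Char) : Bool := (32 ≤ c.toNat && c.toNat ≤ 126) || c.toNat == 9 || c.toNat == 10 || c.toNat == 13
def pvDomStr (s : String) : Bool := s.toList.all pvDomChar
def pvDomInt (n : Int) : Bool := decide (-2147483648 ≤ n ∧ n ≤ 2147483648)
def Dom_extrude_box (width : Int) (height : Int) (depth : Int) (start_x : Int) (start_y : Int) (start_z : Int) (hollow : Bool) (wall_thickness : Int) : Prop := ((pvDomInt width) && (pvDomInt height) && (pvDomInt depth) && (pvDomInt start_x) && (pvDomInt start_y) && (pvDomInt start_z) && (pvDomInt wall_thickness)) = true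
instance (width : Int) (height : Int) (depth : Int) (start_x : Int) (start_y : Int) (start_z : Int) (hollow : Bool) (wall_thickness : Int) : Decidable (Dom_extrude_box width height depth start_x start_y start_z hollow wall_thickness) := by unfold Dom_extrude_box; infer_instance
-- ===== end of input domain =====

-- B emits the shell rows directly (wall slabs, wall rows and two short z-runs; a filled
-- box is a shell of full thickness) instead of A's per-cell wall test over the volume.

-- ===== PORT A =====
def extrude_box (width : Int) (height : Int) (depth : Int) (start_x : Int) (start_y : Int) (start_z : Int) (hollow : Bool) (wall_thickness : Int) : List (Int × Int × Int) :=
  (PySem.List.pyRange start_x (start_x + width) 1).foldl (fun points x =>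
    (PySem.List.pyRange start_y (start_y + height) 1).foldl (fun points y =>
      (PySem.List.pyRange start_z (start_z + depth) 1).foldl (fun points z =>
        if hollow then
          let on_x_wall : Bool := decide (x < start_x + wall_thickness) || decide (x ≥ start_x + width - wall_thickness)
          let on_y_wall : Bool := decide (y < start_y + wall_thickness) || decide (y ≥ start_y + height - wall_thickness)
          let on_z_wall : Bool := decide (z < start_z + wall_thickness) || decide (z ≥ start_z + depth - wall_thickness)
          if on_x_wall || on_y_wall || on_z_wall then PySem.Set.add points (x, y, z) else points
        else PySem.Set.add points (x, y, z)) points) points) PySem.Set.empty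

-- ===== PORT B =====
def extrude_box_alt (width : Int) (height : Int) (depth : Int) (start_x : Int) (start_y : Int) (start_z : Int) (hollow : Bool) (wall_thickness : Int) : List (Int × Int × Int) :=
  let t : Int := if hollow then wall_thickness else max width (max height depth)
  (PySem.List.pyRange start_x (start_x + width) 1).foldl (fun points x =>
    if decide (x < start_x + t) || decide (x ≥ start_x + width - t) then
      (PySem.List.pyRange start_y (start_y + height) 1).foldl (fun points y =>
        (PySem.List.pyRange start_z (start_z + depth) 1).foldl (fun points z =>
          PySem.Set.add points (x, y, z)) points) points
    else
      (PySem.List.pyRange start_y (start_y + height) 1).foldl (fun points y =>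
        if decide (y < start_y + t) || decide (y ≥ start_y + height - t) then
          (PySem.List.pyRange start_z (start_z + depth) 1).foldl (fun points z =>
            PySem.Set.add points (x, y, z)) points
        else
          let points := (PySem.List.pyRange start_z (min (start_z + t) (start_z + depth)) 1).foldl (fun points z =>
            PySem.Set.add points (x, y, z)) points
          (PySem.List.pyRange (max (start_z + depth - t) (start_z + t)) (start_z + depth) 1).foldl (fun points z =>
            PySem.Set.add points (x, y, z)) points) points) PySem.Set.empty

-- ===== PRECONDITION & SPEC =====
def Spec_extrude_box (width : Int) (height : Int) (depth : Int) (start_x : Int) (start_y : Int) (start_z : Int) (hollow : Bool) (wall_thickness : Int) (out : List (Int × Int × Int)) : Prop := out = extrude_box_alt width height depth start_x start_y start_z hollow wall_thickness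
instance (width : Int) (height : Int) (depth : Int) (start_x : Int) (start_y : Int) (start_z : Int) (hollow : Bool) (wall_thickness : Int) (out : List (Int × Int × Int)) : Decidable (Spec_extrude_box width height depth start_x start_y start_z hollow wall_thickness out) := by unfold Spec_extrude_box; infer_instance

-- ===== CLAIM (what is proved, stated in full; the proofs are below) =====
def Claim_equal_extrude_box : Prop := ∀ (width : Int) (height : Int) (depth : Int) (start_x : Int) (start_y : Int) (start_z : Int) (hollow : Bool) (wall_thickness : Int), Dom_extrude_box width height depth start_x start_y start_z hollow wall_thickness → Spec_extrude_box width height depth start_x start_y start_z hollow wall_thickness (extrude_box width height depth start_x start_y start_z hollow wall_thickness)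

-- ===== LEMMAS AND PROOFS =====

-- wall tests and the full box in lexicographic order
def pvCondX (w sx t : Int) (x : Int) : Bool := decide (x < sx + t) || decide (x ≥ sx + w - t)
def pvCondY (h sy t : Int) (y : Int) : Bool := decide (y < sy + t) || decide (y ≥ sy + h - t)
def pvCondZ (d sz t : Int) (z : Int) : Bool := decide (z < sz + t) || decide (z ≥ sz + d - t)
def pvCond (w h d sx sy sz t : Int) (p : Int × Int × Int) : Bool :=
  pvCondX w sx t p.1 || pvCondY h sy t p.2.1 || pvCondZ d sz t p.2.2
def pvBlock (h d sy sz : Int) (x : Int) : List (Int × Int × Int) :=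
  (PySem.List.pyRange sy (sy + h) 1).flatMap (fun y => (PySem.List.pyRange sz (sz + d) 1).map (fun z => (x, y, z)))
def pvBigL (w h d sx sy sz : Int) : List (Int × Int × Int) :=
  (PySem.List.pyRange sx (sx + w) 1).flatMap (fun x => pvBlock h d sy sz x)
-- the rows B emits
def pvEnds (d sz t x y : Int) : List (Int × Int × Int) :=
  (PySem.List.pyRange sz (min (sz + t) (sz + d)) 1).map (fun z => (x, y, z)) ++
  (PySem.List.pyRange (max (sz + d - t) (sz + t)) (sz + d) 1).map (fun z => (x, y, z))
def pvSegY (h d sy sz t x y : Int) : List (Int × Int × Int) :=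
  if pvCondY h sy t y then (PySem.List.pyRange sz (sz + d) 1).map (fun z => (x, y, z)) else pvEnds d sz t x y
def pvSeg (w h d sx sy sz t x : Int) : List (Int × Int × Int) :=
  if pvCondX w sx t x then pvBlock h d sy sz x else (PySem.List.pyRange sy (sy + h) 1).flatMap (pvSegY h d sy sz t x)

-- a run of Set.adds of fresh distinct elements is plain append
lemma pv_fold_add_map {α : Type} [BEq α] [LawfulBEq α] (f : Int → α) :
    ∀ (Z : List Int) (s : PySem.Set α), (Z.map f).Nodup → (∀ a ∈ Z.map f, a ∉ s) →
      Z.foldl (fun s z => PySem.Set.add s (f z)) s = s ++ Z.map f := by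
  intro Z
  induction Z with
  | nil => intro s _ _; simp
  | cons z Z ih =>
    intro s hnd hdis
    simp only [List.map_cons, List.nodup_cons] at hnd
    rw [List.foldl_cons, PySem.Set.add_of_not_mem (hdis _ (by simp)),
      ih (s ++ [f z]) hnd.2 ?_]
    · simp
    · intro a ha
      simp only [List.mem_append, List.mem_singleton]
      rintro (h | h)
      · exact hdis a (by simp [ha]) h
      · exact hnd.1 (h ▸ ha)

-- a guarded run of Set.adds of fresh distinct elements is append-of-filter
lemma pv_fold_addIf {α : Type} [BEq α] [LawfulBEq α] (p : α → Bool) :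
    ∀ (L : List α) (s : PySem.Set α), L.Nodup → (∀ a ∈ L, a ∉ s) →
      L.foldl (fun s a => if p a then PySem.Set.add s a else s) s = s ++ L.filter p := by
  intro L
  induction L with
  | nil => intro s _ _; simp
  | cons a L ih =>
    intro s hnd hdis
    simp only [List.nodup_cons] at hnd
    rw [List.foldl_cons, List.filter_cons]
    by_cases hp : p a
    · rw [if_pos hp, if_pos hp, PySem.Set.add_of_not_mem (hdis _ (by simp)),
        ih (s ++ [a]) hnd.2 ?_]
      · simp
      · intro b hb
        simp only [List.mem_append, List.mem_singleton]
        rintro (h | h)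
        · exact hdis b (by simp [hb]) h
        · exact hnd.1 (h ▸ hb)
    · rw [if_neg hp, if_neg hp, ih s hnd.2 (fun b hb => hdis b (by simp [hb]))]

-- generic loop-to-segments lemma: a fold whose body appends its own segment is the flatMap
lemma pv_foldl_seg {α β : Type} [BEq α] [LawfulBEq α] (g : PySem.Set α → β → PySem.Set α)
    (seg : β → List α) (h : ∀ (s : PySem.Set α) (b : β), (∀ a ∈ seg b, a ∉ s) → g s b = s ++ seg b) :
    ∀ (L : List β) (s : PySem.Set α), (L.flatMap seg).Nodup → (∀ a ∈ L.flatMap seg, a ∉ s) →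
      L.foldl g s = s ++ L.flatMap seg := by
  intro L
  induction L with
  | nil => intro s _ _; simp
  | cons b L ih =>
    intro s hnd hdis
    simp only [List.flatMap_cons] at hnd hdis ⊢
    rw [List.nodup_append] at hnd
    rw [List.foldl_cons, h s b (fun a ha => hdis a (by simp [ha])),
      ih (s ++ seg b) hnd.2.1 ?_]
    · simp
    · intro a ha
      simp only [List.mem_append]
      rintro (hs | hb)
      · exact hdis a (by simp [ha]) hs
      · exact hnd.2.2 a hb a ha rfl

lemma pv_nodup_block (h d sy sz x : Int) : (pvBlock h d sy sz x).Nodup := by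
  have he : pvBlock h d sy sz x
      = ((PySem.List.pyRange sy (sy + h) 1) ×ˢ (PySem.List.pyRange sz (sz + d) 1)).map (Prod.mk x) := by
    simp [pvBlock, SProd.sprod, List.product, List.map_flatMap, List.map_map, Function.comp_def]
  rw [he]
  exact ((PySem.List.nodup_pyRange_one _ _).product (PySem.List.nodup_pyRange_one _ _)).map
    (fun p q hpq => congrArg Prod.snd hpq)

lemma pv_nodup_bigL (w h d sx sy sz : Int) : (pvBigL w h d sx sy sz).Nodup := by
  have he : pvBigL w h d sx sy sz
      = (PySem.List.pyRange sx (sx + w) 1) ×ˢ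
        ((PySem.List.pyRange sy (sy + h) 1) ×ˢ (PySem.List.pyRange sz (sz + d) 1)) := by
    simp [pvBigL, pvBlock, SProd.sprod, List.product, List.map_flatMap, List.map_map, Function.comp_def]
  rw [he]
  exact (PySem.List.nodup_pyRange_one _ _).product
    ((PySem.List.nodup_pyRange_one _ _).product (PySem.List.nodup_pyRange_one _ _))

-- A's hollow loop is the wall-filter of the full box
lemma pv_A_eq (w h d sx sy sz t : Int) :
    extrude_box w h d sx sy sz true t = (pvBigL w h d sx sy sz).filter (pvCond w h d sx sy sz t) := by
  have h1 : extrude_box w h d sx sy sz true t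
      = (pvBigL w h d sx sy sz).foldl
          (fun s p => if pvCond w h d sx sy sz t p then PySem.Set.add s p else s) [] := by
    unfold extrude_box pvBigL pvBlock
    simp only [List.foldl_flatMap, List.foldl_map]
    rfl
  rw [h1, pv_fold_addIf _ _ [] (pv_nodup_bigL w h d sx sy sz) (by simp)]
  simp

-- the z-run split: filtering a z-row by the z-wall test gives B's two runs
lemma pv_zsplit (a b T : Int) :
    (PySem.List.pyRange a b 1).filter (fun z => decide (z < a + T) || decide (z ≥ b - T)) =
      PySem.List.pyRange a (min (a + T) b) 1 ++ PySem.List.pyRange (max (b - T) (a + T)) b 1 := by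
  by_cases hba : b ≤ a
  · rw [PySem.List.pyRange_one_eq_nil hba, PySem.List.pyRange_one_eq_nil (by omega),
      PySem.List.pyRange_one_eq_nil (by omega)]
    simp
  · by_cases hT : T ≤ 0
    · rw [List.filter_eq_nil_iff.mpr ?_, PySem.List.pyRange_one_eq_nil (by omega),
        PySem.List.pyRange_one_eq_nil (by omega)]
      · simp
      · intro z hz
        rw [PySem.List.mem_pyRange_one] at hz
        simp only [Bool.or_eq_true, decide_eq_true_eq, ge_iff_le, not_or, not_lt, not_le]
        omega
    · by_cases hmid : a + T ≤ b - T
      · have h1 : min (a + T) b = a + T := by omega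
        have h2 : max (b - T) (a + T) = b - T := by omega
        rw [h1, h2, PySem.List.pyRange_one_append a (a + T) b (by omega) (by omega),
          PySem.List.pyRange_one_append (a + T) (b - T) b (by omega) (by omega),
          List.filter_append, List.filter_append,
          List.filter_eq_self.mpr ?_, List.filter_eq_nil_iff.mpr ?_, List.filter_eq_self.mpr ?_]
        · simp
        · intro z hz
          rw [PySem.List.mem_pyRange_one] at hz
          simp only [Bool.or_eq_true, decide_eq_true_eq, ge_iff_le]
          omega
        · intro z hz
          rw [PySem.List.mem_pyRange_one] at hz
          simp only [Bool.or_eq_true, decide_eq_true_eq, ge_iff_le, not_or, not_lt, not_le]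
          omega
        · intro z hz
          rw [PySem.List.mem_pyRange_one] at hz
          simp only [Bool.or_eq_true, decide_eq_true_eq, ge_iff_le]
          omega
      · rw [List.filter_eq_self.mpr ?_]
        · by_cases hc : b ≤ a + T
          · have h1 : min (a + T) b = b := by omega
            rw [h1, PySem.List.pyRange_one_eq_nil (le_max_of_le_right hc)]
            simp
          · have h1 : min (a + T) b = a + T := by omega
            have h2 : max (b - T) (a + T) = a + T := by omega
            rw [h1, h2, ← PySem.List.pyRange_one_append a (a + T) b (by omega) (by omega)]
        · intro z hz
          rw [PySem.List.mem_pyRange_one] at hz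
          simp only [Bool.or_eq_true, decide_eq_true_eq, ge_iff_le]
          omega

-- pointwise: B's segment for layer x is the wall-filter of that layer
lemma pv_seg_eq (w h d sx sy sz t x : Int) :
    pvSeg w h d sx sy sz t x = (pvBlock h d sy sz x).filter (pvCond w h d sx sy sz t) := by
  unfold pvSeg
  by_cases hx : pvCondX w sx t x
  · rw [if_pos hx, eq_comm, List.filter_eq_self.mpr]
    intro p hp
    simp only [pvBlock, List.mem_flatMap, List.mem_map] at hp
    obtain ⟨y, _, z, _, rfl⟩ := hp
    simp [pvCond, hx]
  · rw [if_neg hx]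
    unfold pvBlock
    rw [List.filter_flatMap]
    congr 1
    funext y
    unfold pvSegY
    by_cases hy : pvCondY h sy t y
    · rw [if_pos hy, eq_comm, List.filter_eq_self.mpr]
      intro p hp
      simp only [List.mem_map] at hp
      obtain ⟨z, _, rfl⟩ := hp
      simp [pvCond, hy]
    · rw [if_neg hy]
      have hx' : pvCondX w sx t x = false := by simpa using hx
      have hy' : pvCondY h sy t y = false := by simpa using hy
      have hf : List.filter (pvCond w h d sx sy sz t)
            ((PySem.List.pyRange sz (sz + d) 1).map (fun z => (x, y, z)))
          = ((PySem.List.pyRange sz (sz + d) 1).filter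
              (fun z => decide (z < sz + t) || decide (z ≥ sz + d - t))).map (fun z => (x, y, z)) := by
        rw [List.filter_map]
        refine congrArg _ (List.filter_congr ?_)
        intro z _
        simp [Function.comp, pvCond, pvCondZ, hx', hy']
      rw [hf, pv_zsplit sz (sz + d) t, List.map_append]
      rfl

-- B's hollow loop emits exactly its segments
lemma pv_Bfold_eq (w h d sx sy sz t : Int) (hnd : ((PySem.List.pyRange sx (sx + w) 1).flatMap (pvSeg w h d sx sy sz t)).Nodup) :
    ((PySem.List.pyRange sx (sx + w) 1).foldl (fun points x =>
      if decide (x < sx + t) || decide (x ≥ sx + w - t) then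
        (PySem.List.pyRange sy (sy + h) 1).foldl (fun points y =>
          (PySem.List.pyRange sz (sz + d) 1).foldl (fun points z =>
            PySem.Set.add points (x, y, z)) points) points
      else
        (PySem.List.pyRange sy (sy + h) 1).foldl (fun points y =>
          if decide (y < sy + t) || decide (y ≥ sy + h - t) then
            (PySem.List.pyRange sz (sz + d) 1).foldl (fun points z =>
              PySem.Set.add points (x, y, z)) points
          else
            (PySem.List.pyRange (max (sz + d - t) (sz + t)) (sz + d) 1).foldl (fun points z =>
              PySem.Set.add points (x, y, z))
              ((PySem.List.pyRange sz (min (sz + t) (sz + d)) 1).foldl (fun points z =>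
                PySem.Set.add points (x, y, z)) points)) points) [])
    = (PySem.List.pyRange sx (sx + w) 1).flatMap (pvSeg w h d sx sy sz t) := by
  rw [pv_foldl_seg _ (pvSeg w h d sx sy sz t) ?_ _ [] hnd (by simp)]
  · simp
  · intro s x hdis
    show (if pvCondX w sx t x then _ else _) = _
    unfold pvSeg at hdis
    unfold pvSeg
    by_cases hx : pvCondX w sx t x
    · rw [if_pos hx, if_pos hx]
      have hndb : (pvBlock h d sy sz x).Nodup := pv_nodup_block h d sy sz x
      rw [pv_foldl_seg _ (fun y => (PySem.List.pyRange sz (sz + d) 1).map (fun z => (x, y, z))) ?_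
        _ s hndb (by rw [if_pos hx] at hdis; exact hdis)]
      · rfl
      · intro s' y hdis'
        exact pv_fold_add_map _ _ s'
          ((PySem.List.nodup_pyRange_one _ _).map (fun p q hpq => by simpa using hpq)) hdis'
    · rw [if_neg hx, if_neg hx]
      rw [if_neg hx] at hdis
      have hnds : ((PySem.List.pyRange sy (sy + h) 1).flatMap (pvSegY h d sy sz t x)).Nodup := by
        have : (PySem.List.pyRange sy (sy + h) 1).flatMap (pvSegY h d sy sz t x)
            = (pvBlock h d sy sz x).filter (pvCond w h d sx sy sz t) := by
          have := pv_seg_eq w h d sx sy sz t x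
          rwa [pvSeg, if_neg hx] at this
        rw [this]
        exact (pv_nodup_block h d sy sz x).filter _
      rw [pv_foldl_seg _ (pvSegY h d sy sz t x) ?_ _ s hnds hdis]
      intro s' y hdis'
      show (if pvCondY h sy t y then _ else _) = _
      unfold pvSegY at hdis' ⊢
      by_cases hy : pvCondY h sy t y
      · rw [if_pos hy, if_pos hy]
        rw [if_pos hy] at hdis'
        exact pv_fold_add_map _ _ s'
          ((PySem.List.nodup_pyRange_one _ _).map (fun p q hpq => by simpa using hpq)) hdis'
      · rw [if_neg hy, if_neg hy]
        rw [if_neg hy] at hdis'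
        unfold pvEnds at hdis' ⊢
        have hdpre : ∀ a ∈ (PySem.List.pyRange sz (min (sz + t) (sz + d)) 1).map (fun z => (x, y, z)), a ∉ s' :=
          fun a ha => hdis' a (List.mem_append.mpr (Or.inl ha))
        rw [pv_fold_add_map _ _ s'
          ((PySem.List.nodup_pyRange_one _ _).map (fun p q hpq => by simpa using hpq)) hdpre]
        rw [pv_fold_add_map _ _ _
          ((PySem.List.nodup_pyRange_one _ _).map (fun p q hpq => by simpa using hpq)) ?_]
        · rw [List.append_assoc]
        · intro a ha
          simp only [List.mem_append]
          rintro (hs | hpre)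
          · exact hdis' a (by simp only [List.mem_append]; exact Or.inr ha) hs
          · simp only [List.mem_map] at ha hpre
            obtain ⟨z1, hz1, rfl⟩ := ha
            obtain ⟨z2, hz2, heq⟩ := hpre
            rw [PySem.List.mem_pyRange_one] at hz1 hz2
            have : z2 = z1 := by simpa using congrArg (fun p => p.2.2) heq
            omega

-- the segments together are the wall-filter of the whole box
lemma pv_flat_seg_eq (w h d sx sy sz t : Int) :
    (PySem.List.pyRange sx (sx + w) 1).flatMap (pvSeg w h d sx sy sz t)
      = (pvBigL w h d sx sy sz).filter (pvCond w h d sx sy sz t) := by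
  unfold pvBigL
  rw [List.filter_flatMap]
  congr 1
  funext x
  exact pv_seg_eq w h d sx sy sz t x

-- ===== VERDICT (by name: the statement is the Claim_ definition above) =====
theorem extrude_box_spec : Claim_equal_extrude_box := by
  intro w h d sx sy sz hollow t _
  unfold Spec_extrude_box
  cases hollow with
  | false =>
    simp only [extrude_box, extrude_box_alt, Bool.false_eq_true, if_false]
    refine (PySem.List.foldl_congr_mem _ _ _ _ ?_).symm
    intro acc x hx
    rw [PySem.List.mem_pyRange_one] at hx
    rw [if_pos ?_]
    · have h1 : w ≤ max w (max h d) := le_max_left _ _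
      simp only [Bool.or_eq_true, decide_eq_true_eq]
      omega
  | true =>
    rw [pv_A_eq w h d sx sy sz t, ← pv_flat_seg_eq w h d sx sy sz t]
    have hnd : ((PySem.List.pyRange sx (sx + w) 1).flatMap (pvSeg w h d sx sy sz t)).Nodup := by
      rw [pv_flat_seg_eq]
      exact (pv_nodup_bigL w h d sx sy sz).filter _
    exact (pv_Bfold_eq w h d sx sy sz t hnd).symm
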